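-- pv_equiv track=rewrite | github.com/Wlodeks939/HelsinkiPythonMOOC2024 | Part04/37_neighbours_in_list.py | longest_series_of_neighbours
-- ===== SOURCE A (Python) =====
-- def longest_series_of_neighbours(lista):
--
--     count = 1
--     list_max = []
--
--     for i in range(len(lista)-1):
--
--         if lista[i] - lista[i+1] == 1 or lista[i] - lista[i+1] == -1:
--             count += 1
--         else:
--             list_max.append(count)
--             count = 1
--
--     list_max.append(count)
--     return max(list_max)
-- ===== SOURCE B (Python) =====
-- def longest_series_of_neighbours(lista):
--     n = len(lista)
--     m = max(n - 1, 0)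
--     # indices of adjacent pairs that do NOT differ by 1, framed by sentinel cuts
--     cuts = [-1] + [i for i in range(m) if abs(lista[i] - lista[i + 1]) != 1] + [m]
--     # the longest series is the widest gap between consecutive cuts
--     return max(b - a for a, b in zip(cuts, cuts[1:]))
-- ===== Notes on version B (the rewrite author's own statement) =====
-- stated objective: alternative
-- what changed: B replaces A's running counter-with-reset that accumulates segment lengths and takes their max by a build-then-scan decomposition: it lists the break indices (adjacent pairs not differing by 1), frames them with sentinel cuts -1 and n-1, and returns the widest gap between consecutive cuts.
import Mathlib
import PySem

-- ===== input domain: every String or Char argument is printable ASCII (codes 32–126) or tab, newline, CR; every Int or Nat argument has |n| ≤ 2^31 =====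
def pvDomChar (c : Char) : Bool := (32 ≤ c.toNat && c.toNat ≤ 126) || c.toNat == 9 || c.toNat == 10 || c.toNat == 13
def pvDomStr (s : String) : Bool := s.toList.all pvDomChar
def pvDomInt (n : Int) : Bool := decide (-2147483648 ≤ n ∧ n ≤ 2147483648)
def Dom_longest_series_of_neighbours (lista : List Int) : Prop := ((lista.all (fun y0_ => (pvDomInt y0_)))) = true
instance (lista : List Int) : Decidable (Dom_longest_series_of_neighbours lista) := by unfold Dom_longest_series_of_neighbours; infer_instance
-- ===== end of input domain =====

-- B replaces A's counter-with-reset segment scan by listing the break indices with sentinel cuts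
-- and taking the widest gap between consecutive cuts (alternative decomposition, same cost).

-- ===== PORT A =====
def longest_series_of_neighbours (lista : List Int) : Int :=
  let n : Int := PySem.List.len lista
  let st : Int × List Int :=
    (PySem.List.pyRange 0 (n - 1) 1).foldl
      (fun (s : Int × List Int) i =>
        if PySem.List.pyGetD lista i 0 - PySem.List.pyGetD lista (i + 1) 0 = 1 ∨
           PySem.List.pyGetD lista i 0 - PySem.List.pyGetD lista (i + 1) 0 = -1 then
          (s.1 + 1, s.2)
        else
          (1, s.2 ++ [s.1]))
      (1, [])
  let list_max : List Int := st.2 ++ [st.1]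
  (PySem.List.max? list_max (fun x => x)).getD 0

-- ===== PORT B =====
def longest_series_of_neighbours_alt (lista : List Int) : Int :=
  let n : Int := PySem.List.len lista
  let m : Int := max (n - 1) 0
  let cuts : List Int :=
    [-1] ++ (PySem.List.pyRange 0 m 1).filter
      (fun i => decide (¬ (PySem.List.pyGetD lista i 0 - PySem.List.pyGetD lista (i + 1) 0).natAbs = 1))
    ++ [m]
  (PySem.List.max? ((cuts.zip (cuts.drop 1)).map (fun q => q.2 - q.1)) (fun x => x)).getD 0

-- ===== PRECONDITION & SPEC =====
def Spec_longest_series_of_neighbours (lista : List Int) (out : Int) : Prop := out = longest_series_of_neighbours_alt lista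
instance (lista : List Int) (out : Int) : Decidable (Spec_longest_series_of_neighbours lista out) := by unfold Spec_longest_series_of_neighbours; infer_instance

-- ===== CLAIM (what is proved, stated in full; the proofs are below) =====
def Claim_equal_longest_series_of_neighbours : Prop := ∀ (lista : List Int), Dom_longest_series_of_neighbours lista → Spec_longest_series_of_neighbours lista (longest_series_of_neighbours lista)

-- ===== LEMMAS AND PROOFS =====

-- the neighbour test at index i, as one Bool predicate shared by both proofs
def pvQ (lista : List Int) (i : Int) : Bool :=
  decide (PySem.List.pyGetD lista i 0 - PySem.List.pyGetD lista (i + 1) 0 = 1 ∨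
          PySem.List.pyGetD lista i 0 - PySem.List.pyGetD lista (i + 1) 0 = -1)

-- the list of segment lengths A's loop produces, as a recursion over the index list
def pvSegs (q : Int → Bool) : Int → List Int → List Int
  | c, [] => [c]
  | c, i :: t => if q i then pvSegs q (c + 1) t else c :: pvSegs q 1 t

-- the common value: max segment length starting from current count c
def pvFR (q : Int → Bool) : Int → List Int → Int
  | c, [] => c
  | c, i :: t => if q i then pvFR q (c + 1) t else max c (pvFR q 1 t)

def pvMv (l : List Int) : Int := (PySem.List.max? l (fun x => x)).getD 0
def pvGaps (l : List Int) : List Int := (l.zip (l.drop 1)).map (fun q => q.2 - q.1)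

theorem pvFoldA (q : Int → Bool) (l : List Int) (c : Int) (acc : List Int) :
    (l.foldl (fun (s : Int × List Int) i => if q i then (s.1 + 1, s.2) else (1, s.2 ++ [s.1])) (c, acc)).2
      ++ [(l.foldl (fun (s : Int × List Int) i => if q i then (s.1 + 1, s.2) else (1, s.2 ++ [s.1])) (c, acc)).1]
    = acc ++ pvSegs q c l := by
  induction l generalizing c acc with
  | nil => simp [pvSegs]
  | cons i t ih =>
    by_cases h : q i = true
    · simp [pvSegs, h, ih]
    · simp only [Bool.not_eq_true] at h
      simp [pvSegs, h, ih]

theorem pvSegs_ne_nil (q : Int → Bool) (c : Int) (l : List Int) : pvSegs q c l ≠ [] := by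
  induction l generalizing c with
  | nil => simp [pvSegs]
  | cons i t ih =>
    by_cases h : q i = true
    · simpa [pvSegs, h] using ih (c + 1)
    · simp only [Bool.not_eq_true] at h
      simp [pvSegs, h]

theorem pvFoldlMax (t : List Int) (a b : Int) : t.foldl max (max a b) = max a (t.foldl max b) := by
  induction t generalizing b with
  | nil => rfl
  | cons h t ih => simpa [List.foldl_cons, max_assoc] using ih (max b h)

theorem pvMv_single (x : Int) : pvMv [x] = x := by
  simp [pvMv, PySem.List.max?_id_cons]

theorem pvMv_cons (x : Int) (l : List Int) (h : l ≠ []) : pvMv (x :: l) = max x (pvMv l) := by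
  obtain ⟨y, t, rfl⟩ := List.exists_cons_of_ne_nil h
  simp [pvMv, PySem.List.max?_id_cons, pvFoldlMax]

theorem pvMv_segs (q : Int → Bool) (l : List Int) (c : Int) :
    pvMv (pvSegs q c l) = pvFR q c l := by
  induction l generalizing c with
  | nil => simp [pvSegs, pvFR, pvMv_single]
  | cons i t ih =>
    by_cases h : q i = true
    · simp [pvSegs, pvFR, h, ih]
    · simp only [Bool.not_eq_true] at h
      simp [pvSegs, pvFR, h, pvMv_cons _ _ (pvSegs_ne_nil q 1 t), ih]

theorem pvGaps_cons (x y : Int) (r : List Int) :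
    pvGaps (x :: y :: r) = (y - x) :: pvGaps (y :: r) := by
  simp [pvGaps]

theorem pvGaps_ne_nil (x y : Int) (r : List Int) : pvGaps (x :: (r ++ [y])) ≠ [] := by
  cases r <;> simp [pvGaps]

theorem pvMain (q : Int → Bool) (k : Nat) :
    ∀ (a prev : Int),
      pvMv (pvGaps (prev :: (PySem.List.pyRange a (a + k) 1).filter (fun i => !q i) ++ [a + (k : Int)]))
        = pvFR q (a - prev) (PySem.List.pyRange a (a + k) 1) := by
  induction k with
  | zero =>
    intro a prev
    rw [PySem.List.pyRange_one_eq_nil (by omega)]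
    simp [pvFR, pvGaps, pvMv_single]
  | succ k ih =>
    intro a prev
    rw [PySem.List.pyRange_one_cons (by omega : a < a + (k + 1 : Nat))]
    have hb : a + ((k : Nat) + 1 : Nat) = (a + 1) + (k : Nat) := by push_cast; ring
    by_cases h : q a = true
    · have hfa : (!q a) = false := by simp [h]
      rw [List.filter_cons_of_neg (by simp [hfa])]
      have := ih (a + 1) prev
      rw [hb]
      rw [this]
      have hc : a + 1 - prev = a - prev + 1 := by ring
      simp [pvFR, h, hc]
    · simp only [Bool.not_eq_true] at h
      rw [List.filter_cons_of_pos (by simp [h])]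
      rw [hb]
      simp only [List.cons_append]
      rw [pvGaps_cons prev a (List.filter (fun i => !q i) (PySem.List.pyRange (a+1) (a+1+(k:Int)) 1) ++ [a + 1 + (k:Int)])]
      rw [pvMv_cons _ _ (pvGaps_ne_nil a (a + 1 + (k : Int)) _)]
      have ih' := ih (a + 1) a
      simp only [List.cons_append] at ih'
      rw [ih']
      have hc : a + 1 - a = 1 := by ring
      simp [pvFR, h, hc]

-- A's loop condition and B's filter condition are the same predicate
theorem pvFilter_eq (lista : List Int) :
    (fun i => decide (¬ (PySem.List.pyGetD lista i 0 - PySem.List.pyGetD lista (i + 1) 0).natAbs = 1))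
      = fun i => !pvQ lista i := by
  funext i
  simp only [pvQ, decide_not]
  congr 1
  apply decide_eq_decide.mpr
  omega

-- ===== VERDICT (by name: the statement is the Claim_ definition above) =====
theorem longest_series_of_neighbours_spec : Claim_equal_longest_series_of_neighbours := by
  intro lista _
  unfold Spec_longest_series_of_neighbours
  cases lista with
  | nil => decide
  | cons x xs =>
    unfold longest_series_of_neighbours longest_series_of_neighbours_alt
    simp only [PySem.List.len_eq, List.length_cons]
    rw [show ((xs.length + 1 : Nat) : Int) - 1 = (xs.length : Int) from by push_cast; ring]
    rw [show max ((xs.length : Int)) 0 = (xs.length : Int) from by omega]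
    -- A's side
    have hstep :
        (fun (s : Int × List Int) i =>
          if PySem.List.pyGetD (x :: xs) i 0 - PySem.List.pyGetD (x :: xs) (i + 1) 0 = 1 ∨
             PySem.List.pyGetD (x :: xs) i 0 - PySem.List.pyGetD (x :: xs) (i + 1) 0 = -1 then
            (s.1 + 1, s.2)
          else (1, s.2 ++ [s.1]))
        = fun (s : Int × List Int) i =>
            if pvQ (x :: xs) i then (s.1 + 1, s.2) else (1, s.2 ++ [s.1]) := by
      funext s i
      by_cases h : PySem.List.pyGetD (x :: xs) i 0 - PySem.List.pyGetD (x :: xs) (i + 1) 0 = 1 ∨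
          PySem.List.pyGetD (x :: xs) i 0 - PySem.List.pyGetD (x :: xs) (i + 1) 0 = -1
      · simp [h, pvQ]
      · simp [h, pvQ]
    rw [hstep]
    have hMv : ∀ l : List Int, (PySem.List.max? l (fun x => x)).getD 0 = pvMv l := fun l => rfl
    rw [hMv, hMv]
    have hG : ∀ l : List Int, ((l.zip (l.drop 1)).map (fun q => q.2 - q.1)) = pvGaps l :=
      fun l => rfl
    rw [hG]
    -- A's side: the loop's segment list, then its max
    have hA := pvFoldA (pvQ (x :: xs)) (PySem.List.pyRange 0 (xs.length : Int) 1) 1 []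
    simp only [List.nil_append] at hA
    rw [hA, pvMv_segs]
    -- B's side
    rw [pvFilter_eq (x :: xs)]
    have hB := pvMain (pvQ (x :: xs)) xs.length 0 (-1)
    simp only [zero_add] at hB
    rw [show (0 : Int) - (-1) = 1 from rfl] at hB
    simp only [List.singleton_append]
    exact hB.symm
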